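-- pv_equiv track=rewrite | github.com/AshanSalinda/ScriptioContinua | src/data_pipeline.py | generate_bioes_tags
-- ===== SOURCE A (Python) =====
-- def generate_bioes_tags(sentence):
--     """
--     Takes a spaced sentence and returns a spaceless string
--     along with its corresponding BIOES character tags.
--     """
--     words = sentence.strip().split()
--
--     continuous_string = ""
--     tags = []
--
--     for word in words:
--         word_len = len(word)
--
--         # Rule 1: Single character words get the 'S' tag
--         if word_len == 1:
--             continuous_string += word[0]
--             tags.append('S')
--
--         # Rule 2: Multi-character words get B, I, and E tags
--         else:
--             for i, char in enumerate(word):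
--                 continuous_string += char
--                 if i == 0:
--                     tags.append('B')  # Beginning
--                 elif i == word_len - 1:
--                     tags.append('E')  # End
--                 else:
--                     tags.append('I')  # Inside
--
--     return continuous_string, tags
-- ===== SOURCE B (Python) =====
-- def generate_bioes_tags(sentence):
--     """
--     Takes a spaced sentence and returns a spaceless string
--     along with its corresponding BIOES character tags.
--     """
--     words = sentence.strip().split()
--     tags = []
--     for w in words:
--         if len(w) == 1:
--             tags.append('S')
--         else:
--             tags.extend(['B'] + ['I'] * (len(w) - 2) + ['E'])
--     return ''.join(words), tags
-- ===== Notes on version B (the rewrite author's own statement) =====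
-- stated objective: idiomatic
-- what changed: B builds the spaceless string by joining the split words with the empty separator and derives each word's whole tag block from its length (B + I*(n-2) + E, or S for length 1), removing the inner enumerate loop and the per-character i==0 / i==len-1 branching.
import Mathlib
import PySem

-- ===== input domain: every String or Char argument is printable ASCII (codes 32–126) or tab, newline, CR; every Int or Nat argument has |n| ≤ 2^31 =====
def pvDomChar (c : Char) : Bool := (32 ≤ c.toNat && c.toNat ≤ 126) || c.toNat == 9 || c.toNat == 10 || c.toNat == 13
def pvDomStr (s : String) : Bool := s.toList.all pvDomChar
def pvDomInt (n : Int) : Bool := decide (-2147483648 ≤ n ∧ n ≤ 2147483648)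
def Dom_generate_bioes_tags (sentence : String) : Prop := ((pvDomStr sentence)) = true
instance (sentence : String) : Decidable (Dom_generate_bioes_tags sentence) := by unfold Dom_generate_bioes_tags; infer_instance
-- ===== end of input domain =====

-- B replaces A's per-character enumerate loop by ''.join(words) and a per-word tag block
-- computed from the word's length (idiomatic decomposition; same cost).

-- ===== PORT A =====
-- literal port: strip then split, then for each word either the single-char 'S' case or the
-- per-character enumerate loop with i==0 / i==word_len-1 branching
def generate_bioes_tags (sentence : String) : String × List String :=
  let words := PySem.Chars.split₀ (PySem.Chars.strip sentence.toList)
  let res := words.foldl (fun st word =>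
    let word_len : Int := PySem.Chars.len word
    if word_len == 1 then
      match PySem.Chars.pyGet? word 0 with
      | some c => (st.1 ++ [c], st.2 ++ ["S"])
      | none => st            -- unreachable (word_len = 1); guard only makes the port total
    else
      (PySem.List.enumerate word 0).foldl (fun st2 ic =>
        let st2 := (st2.1 ++ [ic.2], st2.2)
        if ic.1 == 0 then (st2.1, st2.2 ++ ["B"])
        else if ic.1 == word_len - 1 then (st2.1, st2.2 ++ ["E"])
        else (st2.1, st2.2 ++ ["I"])) st)
    (([] : List Char), ([] : List String))
  (String.mk res.1, res.2)

-- ===== PORT B =====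
-- ['B'] + ['I']*(len(w)-2) + ['E'] for a multi-char word, ['S'] for a single char
def bioesBlock (w : List Char) : List String :=
  if PySem.Chars.len w == (1 : Int) then ["S"]
  else ["B"] ++ List.replicate (w.length - 2) "I" ++ ["E"]

def generate_bioes_tags_alt (sentence : String) : String × List String :=
  let words := PySem.Chars.split₀ (PySem.Chars.strip sentence.toList)
  (String.mk (PySem.Chars.join [] words),
   words.foldl (fun tags w => tags ++ bioesBlock w) [])

-- ===== PRECONDITION & SPEC =====
def Spec_generate_bioes_tags (sentence : String) (out : String × List String) : Prop := out = generate_bioes_tags_alt sentence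
instance (sentence : String) (out : String × List String) : Decidable (Spec_generate_bioes_tags sentence out) := by unfold Spec_generate_bioes_tags; infer_instance

-- ===== CLAIM (what is proved, stated in full; the proofs are below) =====
def Claim_equal_generate_bioes_tags : Prop := ∀ (sentence : String), Dom_generate_bioes_tags sentence → Spec_generate_bioes_tags sentence (generate_bioes_tags sentence)

-- ===== LEMMAS AND PROOFS =====

-- every word produced by split() is nonempty
theorem split₀_go_ne_nil (s cur : List Char) (acc : List (List Char))
    (hacc : ∀ w ∈ acc, w ≠ []) :
    ∀ w ∈ PySem.Chars.split₀.go s cur acc, w ≠ [] := by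
  induction s generalizing cur acc with
  | nil =>
      intro w hw
      simp only [PySem.Chars.split₀.go] at hw
      split at hw
      · exact hacc w (List.mem_reverse.mp hw)
      · next hne =>
          rcases List.mem_cons.mp (List.mem_reverse.mp hw) with rfl | h
          · simp_all [List.isEmpty_iff, List.reverse_eq_nil_iff]
          · exact hacc w h
  | cons c rest ih =>
      intro w hw
      simp only [PySem.Chars.split₀.go] at hw
      split at hw
      · split at hw
        · exact ih [] acc hacc w hw
        · next hne =>
            refine ih [] _ ?_ w hw
            intro v hv
            rcases List.mem_cons.mp hv with rfl | h
            · simp_all [List.isEmpty_iff, List.reverse_eq_nil_iff]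
            · exact hacc v h
      · exact ih (c :: cur) acc hacc w hw

theorem split₀_ne_nil (s : List Char) : ∀ w ∈ PySem.Chars.split₀ s, w ≠ [] :=
  split₀_go_ne_nil s [] [] (by simp)

-- joining with the empty separator concatenates
theorem join_nil_cons (w : List Char) (ws : List (List Char)) :
    PySem.Chars.join [] (w :: ws) = w ++ PySem.Chars.join [] ws := by
  cases ws with
  | nil => simp [PySem.Chars.join, List.intercalate]
  | cons v vs => simpa using PySem.Chars.join_cons_cons [] w v vs

-- the tag A's inner loop appends at index i of a word of length n
def tagAt (n : Int) (i : Int) : String :=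
  if i == 0 then "B" else if i == n - 1 then "E" else "I"

-- A's inner enumerate loop appends chars and per-index tags pointwise
theorem inner_foldl (n : Int) (l : List (Int × Char)) (s : List Char) (t : List String) :
    l.foldl (fun st2 ic =>
        let st2 := (st2.1 ++ [ic.2], st2.2)
        if ic.1 == 0 then (st2.1, st2.2 ++ ["B"])
        else if ic.1 == n - 1 then (st2.1, st2.2 ++ ["E"])
        else (st2.1, st2.2 ++ ["I"])) (s, t)
      = (s ++ l.map (·.2), t ++ l.map (fun ic => tagAt n ic.1)) := by
  induction l generalizing s t with
  | nil => simp
  | cons p ps ih =>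
      have hstep : (let st2 := ((s, t).1 ++ [p.2], (s, t).2)
          if p.1 == 0 then (st2.1, st2.2 ++ ["B"])
          else if p.1 == n - 1 then (st2.1, st2.2 ++ ["E"])
          else (st2.1, st2.2 ++ ["I"])) = ((s ++ [p.2], t ++ [tagAt n p.1]) : List Char × List String) := by
        simp only [tagAt]
        split_ifs <;> simp_all
      rw [List.foldl_cons, hstep, ih]
      simp

-- the tag list of a multi-character word, index by index
theorem map_tagAt (w : List Char) (hw : 2 ≤ w.length) :
    (PySem.List.enumerate w 0).map (fun ic => tagAt (w.length : Int) ic.1)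
      = ["B"] ++ List.replicate (w.length - 2) "I" ++ ["E"] := by
  apply List.ext_getElem
  · simp [PySem.List.length_enumerate]; omega
  · intro k h1 h2
    have hk : k < w.length := by simpa [PySem.List.length_enumerate] using h1
    rw [List.getElem_map, PySem.List.getElem_enumerate]
    simp only [List.append_assoc, List.getElem_append, List.length_cons, List.length_nil,
      List.length_replicate, List.getElem_replicate, tagAt]
    rcases Nat.lt_trichotomy k 0 with h | h | h
    · omega
    · simp [h]
    · by_cases hlast : k = w.length - 1
      · subst hlast
        have e1 : w.length - 1 ≠ 0 := by omega
        have e2 : ((w.length - 1 : ℕ) : ℤ) = (w.length : ℤ) - 1 := by omega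
        have e3 : ¬ (w.length - 1 - 1 < w.length - 2) := by omega
        simp [e1, e2, e3]
        omega
      · have h2' : k - 1 < w.length - 2 := by omega
        have e1 : k ≠ 0 := by omega
        have e2 : ((k : ℤ) ≠ (w.length : ℤ) - 1) := by omega
        simp [e1, e2, h2']

-- one word of A's outer loop appends the word and its whole bioesBlock
theorem word_step (w : List Char) (hwne : w ≠ []) (s : List Char) (t : List String) :
    (let word_len : Int := PySem.Chars.len w
     if word_len == 1 then
       match PySem.Chars.pyGet? w 0 with
       | some c => ((s, t).1 ++ [c], (s, t).2 ++ ["S"])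
       | none => (s, t)
     else
       (PySem.List.enumerate w 0).foldl (fun st2 ic =>
         let st2 := (st2.1 ++ [ic.2], st2.2)
         if ic.1 == 0 then (st2.1, st2.2 ++ ["B"])
         else if ic.1 == word_len - 1 then (st2.1, st2.2 ++ ["E"])
         else (st2.1, st2.2 ++ ["I"])) (s, t))
    = (s ++ w, t ++ bioesBlock w) := by
  have hlen : 1 ≤ w.length := List.length_pos_iff.mpr hwne
  by_cases h1 : w.length = 1
  · rcases w with _ | ⟨c, _ | _⟩ <;> simp_all [bioesBlock, PySem.Chars.len,
      PySem.Chars.pyGet?, PySem.List.pyGet?, PySem.List.pyIdx?]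
  · have h2 : 2 ≤ w.length := by omega
    have hne : (PySem.Chars.len w == (1 : Int)) = false := by
      simp [PySem.Chars.len]; omega
    simp only [PySem.Chars.len] at hne
    simp only [PySem.Chars.len, hne, Bool.false_eq_true, if_false]
    rw [inner_foldl, PySem.List.map_snd_enumerate, map_tagAt w h2]
    simp [bioesBlock, hne]

-- the outer loops agree: A's fold builds (join of words, concatenated blocks)
theorem outer_foldl (ws : List (List Char)) (hws : ∀ w ∈ ws, w ≠ [])
    (s : List Char) (t : List String) :
    ws.foldl (fun (st : List Char × List String) (word : List Char) =>
      let word_len : Int := PySem.Chars.len word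
      if word_len == 1 then
        match PySem.Chars.pyGet? word 0 with
        | some c => (st.1 ++ [c], st.2 ++ ["S"])
        | none => st
      else
        (PySem.List.enumerate word 0).foldl (fun st2 ic =>
          let st2 := (st2.1 ++ [ic.2], st2.2)
          if ic.1 == 0 then (st2.1, st2.2 ++ ["B"])
          else if ic.1 == word_len - 1 then (st2.1, st2.2 ++ ["E"])
          else (st2.1, st2.2 ++ ["I"])) st) (s, t)
    = (s ++ PySem.Chars.join [] ws, ws.foldl (fun tags w => tags ++ bioesBlock w) t) := by
  induction ws generalizing s t with
  | nil => simp [PySem.Chars.join, List.intercalate]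
  | cons w ws ih =>
      rw [List.foldl_cons, word_step w (hws w (by simp)) s t,
        ih (fun v hv => hws v (by simp [hv])) (s ++ w) (t ++ bioesBlock w),
        join_nil_cons]
      simp

-- ===== VERDICT (by name: the statement is the Claim_ definition above) =====
theorem generate_bioes_tags_spec : Claim_equal_generate_bioes_tags := by
  intro sentence _
  unfold Spec_generate_bioes_tags generate_bioes_tags generate_bioes_tags_alt
  have h := outer_foldl (PySem.Chars.split₀ (PySem.Chars.strip sentence.toList))
    (split₀_ne_nil _) [] []
  simp only [List.nil_append] at h
  simp only [h]
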